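-- pv_equiv track=rewrite | github.com/enricotomasi/GeeksforGeeks_problems | Easy/Maximum possible sum.py | returnMaxSum
-- ===== SOURCE A (Python) =====
-- def returnMaxSum(a, b, n):
--     # Your code goes here
--
--     # An efficient solution is to use hashing.
--
--     # Create an empty hash table.
--     # Traverse array elements. Do following for every element A[i].
--
--     # While A[i] is present in hash table, keep removing elements from beginning
--     # of current window and keep subtracting window beginning element of B[] from current sum.
--
--     # Add B[i] to current sum and update result if current sum becomes more.
--     # Return result.
--
--     somma = 0
--     ans = -1
--     index = 0
--
--     mappa = {}
--
--     for i in range(n):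
--         while (a[i] in mappa):
--             mappa.pop(a[index])
--             somma -= b[index]
--             index +=1
--         if a[i] not in mappa:
--             mappa[a[i]] = 1
--             somma += b[i]
--             ans = max(ans, somma)
--
--     return ans
-- ===== SOURCE B (Python) =====
-- def returnMaxSum(a, b, n):
--     # One pass with a prefix-sum array, a last-seen-index dict and a left pointer:
--     # no inner popping loop and no running-sum bookkeeping.
--     prefix = [0]
--     for k in range(n):
--         prefix.append(prefix[-1] + b[k])
--     last = {}
--     left = 0
--     ans = -1
--     for i in range(n):
--         j = last.get(a[i])
--         if j is not None and j >= left: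
--             left = j + 1
--         last[a[i]] = i
--         ans = max(ans, prefix[i + 1] - prefix[left])
--     return ans
-- ===== Notes on version B (the rewrite author's own statement) =====
-- stated objective: alternative
-- what changed: Replaces A's hash-set sliding window (inner while-loop that pops window elements one by one while maintaining a running sum) with a single pass over a precomputed prefix-sum array, a last-seen-index dict and a computed left-pointer jump; window sums become two prefix lookups.
import Mathlib
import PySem

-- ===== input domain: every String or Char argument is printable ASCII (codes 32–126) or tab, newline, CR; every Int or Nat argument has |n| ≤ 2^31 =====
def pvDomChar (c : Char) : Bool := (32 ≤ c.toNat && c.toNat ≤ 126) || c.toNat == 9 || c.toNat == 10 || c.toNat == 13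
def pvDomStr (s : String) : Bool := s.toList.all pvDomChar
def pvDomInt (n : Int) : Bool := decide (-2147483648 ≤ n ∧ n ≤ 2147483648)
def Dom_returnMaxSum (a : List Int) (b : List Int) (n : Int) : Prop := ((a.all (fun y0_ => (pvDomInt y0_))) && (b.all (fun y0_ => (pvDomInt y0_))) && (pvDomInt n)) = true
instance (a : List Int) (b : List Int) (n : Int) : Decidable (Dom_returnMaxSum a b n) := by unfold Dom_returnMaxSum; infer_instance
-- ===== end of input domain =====

-- B replaces A's inner element-popping while-loop and running window sum with a one-pass
-- prefix-sum / last-seen-index / left-pointer scan (alternative algorithm, similar cost).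

-- ===== PORT A =====
-- A's inner 'while a[i] in mappa' loop. Fuel = number of keys of mappa (each pop removes
-- one key, so the real loop runs at most that often); exhausted fuel, an out-of-range
-- a[index]/b[index] (ported with a getD default) and 'mappa.pop' on a missing key (ported
-- as erase) all correspond to Python raising, unreachable under Pre_returnMaxSum.
def pvAwhile (a b : List Int) (ai : Int) :
    Nat → Int × Int × PySem.Dict Int Int → Int × Int × PySem.Dict Int Int
  | 0, st => st
  | fuel + 1, (somma, index, mappa) =>
    if mappa.contains ai then
      pvAwhile a b ai fuel
        (somma - PySem.List.pyGetD b index 0, index + 1,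
         mappa.erase (PySem.List.pyGetD a index 0))
    else (somma, index, mappa)

-- one iteration of A's 'for i in range(n)' loop; state = (somma, ans, index, mappa)
def pvAstep (a b : List Int) (st : Int × Int × Int × PySem.Dict Int Int) (i : Int) :
    Int × Int × Int × PySem.Dict Int Int :=
  match st with
  | (somma, ans, index, mappa) =>
    let ai := PySem.List.pyGetD a i 0
    match pvAwhile a b ai mappa.size (somma, index, mappa) with
    | (somma, index, mappa) =>
      if mappa.contains ai then (somma, ans, index, mappa)
      else (somma + PySem.List.pyGetD b i 0, max ans (somma + PySem.List.pyGetD b i 0),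
            index, mappa.insert ai 1)

def returnMaxSum (a : List Int) (b : List Int) (n : Int) : Int :=
  ((PySem.List.pyRange 0 n 1).foldl (pvAstep a b)
    (0, -1, 0, PySem.Dict.empty)).2.1

-- ===== PORT B =====
-- prefix = [0]; for k in range(n): prefix.append(prefix[-1] + b[k])
def pvPrefix (b : List Int) (n : Int) : List Int :=
  (PySem.List.pyRange 0 n 1).foldl
    (fun pre k => pre ++ [PySem.List.pyGetD pre (-1) 0 + PySem.List.pyGetD b k 0]) [0]

-- one iteration of B's loop; state = (last, left, ans)
def pvBstep (a : List Int) (pre : List Int) (st : PySem.Dict Int Int × Int × Int) (i : Int) :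
    PySem.Dict Int Int × Int × Int :=
  match st with
  | (last, left, ans) =>
    let ai := PySem.List.pyGetD a i 0
    let left := match last.get? ai with
      | some j => if left ≤ j then j + 1 else left
      | none => left
    (last.insert ai i, left,
     max ans (PySem.List.pyGetD pre (i + 1) 0 - PySem.List.pyGetD pre left 0))

def returnMaxSum_alt (a : List Int) (b : List Int) (n : Int) : Int :=
  ((PySem.List.pyRange 0 n 1).foldl (pvBstep a (pvPrefix b n))
    (PySem.Dict.empty, 0, -1)).2.2

-- ===== PRECONDITION & SPEC =====
-- Exactly the inputs on which the Python A returns: both a[i] and b[i] are read for every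
-- i in range(n), so n may not exceed either length (IndexError otherwise); n ≤ 0 is fine.
def Pre_returnMaxSum (a : List Int) (b : List Int) (n : Int) : Prop :=
  n ≤ (a.length : Int) ∧ n ≤ (b.length : Int)
instance (a : List Int) (b : List Int) (n : Int) : Decidable (Pre_returnMaxSum a b n) := by
  unfold Pre_returnMaxSum; infer_instance

def pvWitness_returnMaxSum : List Int × List Int × Int := ([1, 2, 1], [3, 4, 5], 3)

def Spec_returnMaxSum (a : List Int) (b : List Int) (n : Int) (out : Int) : Prop := out = returnMaxSum_alt a b n
instance (a : List Int) (b : List Int) (n : Int) (out : Int) : Decidable (Spec_returnMaxSum a b n out) := by unfold Spec_returnMaxSum; infer_instance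

-- ===== CLAIM (what is proved, stated in full; the proofs are below) =====
def Claim_equal_returnMaxSum : Prop := ∀ (a : List Int) (b : List Int) (n : Int), Dom_returnMaxSum a b n → Pre_returnMaxSum a b n → Spec_returnMaxSum a b n (returnMaxSum a b n)

-- ===== LEMMAS AND PROOFS =====

def sumB (b : List Int) (lo len : Nat) : Int :=
  ((List.range len).map (fun t => b.getD (lo + t) 0)).sum

lemma sumB_succ_right (b : List Int) (lo len : Nat) :
    sumB b lo (len + 1) = sumB b lo len + b.getD (lo + len) 0 := by
  simp [sumB, List.range_succ]
lemma sumB_succ_left (b : List Int) (lo len : Nat) :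
    sumB b lo (len + 1) = b.getD lo 0 + sumB b (lo + 1) len := by
  simp only [sumB, List.range_succ_eq_map, List.map_cons, List.map_map, Function.comp_def,
    List.sum_cons, Nat.add_zero]
  congr 1
  apply congrArg
  apply List.map_congr_left
  intro t _
  have e : lo + t.succ = lo + 1 + t := by omega
  rw [e]
lemma sumB_add (b : List Int) (lo x y : Nat) :
    sumB b lo (x + y) = sumB b lo x + sumB b (lo + x) y := by
  induction y with
  | zero => simp [sumB]
  | succ y ih =>
      have h1 : x + (y + 1) = (x + y) + 1 := by omega
      rw [h1, sumB_succ_right, ih, sumB_succ_right, add_assoc]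
      congr 3
      omega

def winDict (a : List Int) (i0 w : Nat) : PySem.Dict Int Int :=
  PySem.Dict.mk ((List.range w).map (fun t => (a.getD (i0 + t) 0, (1 : Int))))

lemma winDict_erase_head (a : List Int) (i0 w : Nat)
    (h : ∀ t, t < w → a.getD (i0 + 1 + t) 0 ≠ a.getD i0 0) :
    (winDict a i0 (w + 1)).erase (a.getD i0 0) = winDict a (i0 + 1) w := by
  simp only [winDict, PySem.Dict.erase, List.range_succ_eq_map, List.map_cons, List.map_map,
    Function.comp_def, List.filter_cons, Nat.add_zero, beq_self_eq_true, Bool.not_true]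
  simp only [Bool.false_eq_true, if_false]
  congr 1
  rw [List.filter_map, List.filter_eq_self.2]
  · apply List.map_congr_left
    intro t _
    have e : i0 + t.succ = i0 + 1 + t := by omega
    rw [e]
  · intro t ht
    simp only [List.mem_range] at ht
    simp only [Function.comp_apply, Bool.not_eq_eq_eq_not, Bool.not_true, beq_eq_false_iff_ne, ne_eq]
    intro hc; exact h t ht (by rw [← hc]; congr 1; omega)

lemma winDict_contains (a : List Int) (i0 w : Nat) (v : Int) :
    (winDict a i0 w).contains v = true ↔ ∃ t, t < w ∧ a.getD (i0 + t) 0 = v := by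
  simp [winDict, PySem.Dict.contains, List.any_eq_true]

lemma winDict_insert_last (a : List Int) (i0 w : Nat)
    (h : (winDict a i0 w).contains (a.getD (i0 + w) 0) = false) :
    (winDict a i0 w).insert (a.getD (i0 + w) 0) 1 = winDict a i0 (w + 1) := by
  simp only [PySem.Dict.insert, h, Bool.false_eq_true, if_false]
  simp [winDict, List.range_succ]

lemma winDict_size (a : List Int) (i0 w : Nat) : (winDict a i0 w).size = w := by
  simp [winDict, PySem.Dict.size]

lemma pvAwhile_not_mem (a b : List Int) (ai : Int) (fuel : Nat) (somma index : Int)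
    (d : PySem.Dict Int Int) (h : d.contains ai = false) :
    pvAwhile a b ai fuel (somma, index, d) = (somma, index, d) := by
  cases fuel <;> simp [pvAwhile, h]

lemma pvAwhile_run (a b : List Int) (ai : Int) (t0 : Nat) :
    ∀ (i0 w fuel : Nat) (somma : Int),
      t0 < w → a.getD (i0 + t0) 0 = ai →
      (∀ t1 t2, t1 < w → t2 < w → a.getD (i0 + t1) 0 = a.getD (i0 + t2) 0 → t1 = t2) →
      t0 < fuel →
      pvAwhile a b ai fuel (somma, (i0 : Int), winDict a i0 w) =
        (somma - sumB b i0 (t0 + 1), ((i0 + t0 + 1 : Nat) : Int),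
         winDict a (i0 + t0 + 1) (w - (t0 + 1))) := by
  induction t0 with
  | zero =>
      intro i0 w fuel somma ht hv hdist hfuel
      obtain ⟨w', rfl⟩ : ∃ w', w = w' + 1 := ⟨w - 1, by omega⟩
      obtain ⟨f, rfl⟩ : ∃ f, fuel = f + 1 := ⟨fuel - 1, by omega⟩
      have hv0 : a.getD i0 0 = ai := by simpa using hv
      have hc : (winDict a i0 (w' + 1)).contains ai = true :=
        (winDict_contains _ _ _ _).2 ⟨0, by omega, by simpa using hv⟩
      have hne : ∀ t, t < w' → a.getD (i0 + 1 + t) 0 ≠ a.getD i0 0 := by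
        intro t ht' hc'
        have := hdist (t + 1) 0 (by omega) (by omega) (by
          rw [show i0 + (t + 1) = i0 + 1 + t from by omega, hc']; simp)
        omega
      have hc2 : (winDict a (i0 + 1) w').contains ai = false := by
        rw [← Bool.not_eq_true, winDict_contains]
        rintro ⟨t, ht', hvt⟩
        exact hne t ht' (by rw [hvt, hv0])
      simp only [pvAwhile, hc, if_pos]
      rw [PySem.List.pyGetD_natCast, PySem.List.pyGetD_natCast, hv0,
        show ai = a.getD i0 0 from hv0.symm] -- normalize erase key
      rw [winDict_erase_head a i0 w' hne, pvAwhile_not_mem _ _ _ _ _ _ _ (hv0 ▸ hc2)]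
      simp only [Prod.mk.injEq]
      refine ⟨by simp [sumB], by push_cast; ring, by norm_num⟩
  | succ t0 ih =>
      intro i0 w fuel somma ht hv hdist hfuel
      obtain ⟨w', rfl⟩ : ∃ w', w = w' + 1 := ⟨w - 1, by omega⟩
      obtain ⟨f, rfl⟩ : ∃ f, fuel = f + 1 := ⟨fuel - 1, by omega⟩
      have hc : (winDict a i0 (w' + 1)).contains ai = true :=
        (winDict_contains _ _ _ _).2 ⟨t0 + 1, by omega, hv⟩
      have hne : ∀ t, t < w' → a.getD (i0 + 1 + t) 0 ≠ a.getD i0 0 := by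
        intro t ht' hc'
        have := hdist (t + 1) 0 (by omega) (by omega) (by
          rw [show i0 + (t + 1) = i0 + 1 + t from by omega, hc']; simp)
        omega
      simp only [pvAwhile, hc, if_pos]
      rw [PySem.List.pyGetD_natCast, PySem.List.pyGetD_natCast,
        winDict_erase_head a i0 w' hne,
        show ((i0 : Int) + 1) = ((i0 + 1 : Nat) : Int) from by push_cast; ring,
        ih (i0 + 1) w' f (somma - b.getD i0 0) (by omega)
          (by rw [show i0 + 1 + t0 = i0 + (t0 + 1) from by omega]; exact hv)
          (by
            intro t1 t2 h1 h2 he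
            have := hdist (t1 + 1) (t2 + 1) (by omega) (by omega) (by
              rw [show i0 + (t1 + 1) = i0 + 1 + t1 from by omega,
                show i0 + (t2 + 1) = i0 + 1 + t2 from by omega]; exact he)
            omega)
          (by omega)]
      simp only [Prod.mk.injEq]
      refine ⟨by rw [sumB_succ_left b i0 (t0 + 1)]; ring, by push_cast; ring, by congr 1 <;> omega⟩

lemma pvPrefix_eq (b : List Int) (n : Int) :
    pvPrefix b n = (List.range (n.toNat + 1)).map (fun j => sumB b 0 j) := by
  unfold pvPrefix
  rw [PySem.List.pyRange_zero, List.foldl_map]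
  generalize n.toNat = m
  induction m with
  | zero => simp [sumB]
  | succ m ih =>
      rw [List.range_succ, List.foldl_append, ih]
      simp only [List.foldl_cons, List.foldl_nil]
      rw [show (List.range (m + 1)).map (fun j => sumB b 0 j)
            = (List.range m).map (fun j => sumB b 0 j) ++ [sumB b 0 m] from by
          rw [List.range_succ]; simp]
      rw [PySem.List.pyGetD_neg_one_append_singleton, PySem.List.pyGetD_natCast]
      rw [List.range_succ (n := m + 1), List.map_append, List.range_succ (n := m)]
      simp [sumB_succ_right]

def lastFold (a : List Int) (k : Nat) : PySem.Dict Int Int :=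
  (List.range k).foldl (fun d j => d.insert (a.getD j 0) (j : Int)) PySem.Dict.empty

lemma lastFold_succ (a : List Int) (k : Nat) :
    lastFold a (k + 1) = (lastFold a k).insert (a.getD k 0) (k : Int) := by
  simp [lastFold, List.range_succ]

lemma lastFold_mem_val (a : List Int) (k : Nat) (v x : Int)
    (h : (lastFold a k).get? v = some x) :
    ∃ j, j < k ∧ x = (j : Int) ∧ a.getD j 0 = v := by
  induction k with
  | zero => simp [lastFold, PySem.Dict.get?, PySem.Dict.empty] at h
  | succ k ih =>
      rw [lastFold_succ, PySem.Dict.get?_insert] at h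
      by_cases hv : v = a.getD k 0
      · rw [if_pos hv] at h
        exact ⟨k, by omega, by simpa using h.symm, hv.symm⟩
      · rw [if_neg hv] at h
        obtain ⟨j, hj, hx, ha⟩ := ih h
        exact ⟨j, by omega, hx, ha⟩

lemma lastFold_get?_last (a : List Int) (k : Nat) (j : Nat)
    (hj : j < k) (hlast : ∀ t, j < t → t < k → a.getD t 0 ≠ a.getD j 0) :
    (lastFold a k).get? (a.getD j 0) = some (j : Int) := by
  induction k with
  | zero => omega
  | succ k ih =>
      rw [lastFold_succ, PySem.Dict.get?_insert]
      by_cases hjk : j = k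
      · subst hjk; simp
      · rw [if_neg (fun hc => hlast k (by omega) (by omega) hc.symm)]
        exact ih (by omega) (fun t ht1 ht2 => hlast t ht1 (by omega))

lemma main_inv (a b : List Int) (p : List Int) (m : Nat)
    (hp : p = (List.range (m + 1)).map (fun j => sumB b 0 j)) :
    ∀ k, k ≤ m → ∃ (L : Nat) (ans : Int), L ≤ k ∧
      (∀ j1 j2, L ≤ j1 → j1 < k → L ≤ j2 → j2 < k →
        a.getD j1 0 = a.getD j2 0 → j1 = j2) ∧
      (List.range k).foldl (fun st (j : Nat) => pvAstep a b st (j : Int))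
          (0, -1, 0, PySem.Dict.empty) =
        (sumB b L (k - L), ans, (L : Int), winDict a L (k - L)) ∧
      (List.range k).foldl (fun st (j : Nat) => pvBstep a p st (j : Int))
          (PySem.Dict.empty, 0, -1) =
        (lastFold a k, (L : Int), ans) := by
  intro k
  induction k with
  | zero =>
      intro _
      refine ⟨0, -1, le_refl 0, by omega, ?_, ?_⟩ <;> simp [sumB, winDict, lastFold, PySem.Dict.empty]
  | succ k ih =>
      intro hk
      obtain ⟨L, ans, hL, hdist, hA, hB⟩ := ih (by omega)
      rw [List.range_succ, List.foldl_append, List.foldl_append, hA, hB]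
      simp only [List.foldl_cons, List.foldl_nil]
      set v := a.getD k 0 with hv
      by_cases hocc : ∃ j, L ≤ j ∧ j < k ∧ a.getD j 0 = v
      · obtain ⟨j0, hLj0, hj0k, hvj0⟩ := hocc
        obtain ⟨t0, rfl⟩ : ∃ t0, j0 = L + t0 := ⟨j0 - L, by omega⟩
        refine ⟨L + t0 + 1, max ans (sumB b (L + t0 + 1) (k - (L + t0))), by omega, ?_, ?_, ?_⟩
        · intro j1 j2 h1 h2 h3 h4 he
          by_cases e1 : j1 = k <;> by_cases e2 : j2 = k
          · omega
          · exfalso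
            have : j2 = L + t0 := hdist j2 (L + t0) (by omega) (by omega) (by omega) (by omega)
              (by rw [hvj0, hv, ← e1]; exact he.symm)
            omega
          · exfalso
            have : j1 = L + t0 := hdist j1 (L + t0) (by omega) (by omega) (by omega) (by omega)
              (by rw [hvj0, hv, ← e2]; exact he)
            omega
          · exact hdist j1 j2 (by omega) (by omega) (by omega) (by omega) he
        · -- A side
          have hcf : (winDict a (L + t0 + 1) (k - L - (t0 + 1))).contains v = false := by
            rw [← Bool.not_eq_true, winDict_contains]
            rintro ⟨t, ht, hvt⟩
            have := hdist (L + t0 + 1 + t) (L + t0) (by omega) (by omega) (by omega) (by omega)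
              (by rw [hvt, hvj0])
            omega
          simp only [pvAstep, PySem.List.pyGetD_natCast, ← hv, winDict_size]
          rw [pvAwhile_run a b v t0 L (k - L) (k - L) _ (by omega) hvj0
            (fun t1 t2 h1 h2 he => by
              have := hdist (L + t1) (L + t2) (by omega) (by omega) (by omega) (by omega) he
              omega)
            (by omega)]
          have hsplit : sumB b L (k - L)
              = sumB b L (t0 + 1) + sumB b (L + t0 + 1) (k - L - (t0 + 1)) := by
            have h2 := sumB_add b L (t0 + 1) (k - L - (t0 + 1))
            rw [show t0 + 1 + (k - L - (t0 + 1)) = k - L from by omega] at h2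
            exact h2
          have hlast : sumB b (L + t0 + 1) (k - L - (t0 + 1)) + b.getD k 0
              = sumB b (L + t0 + 1) (k + 1 - (L + t0 + 1)) := by
            have h3 := sumB_succ_right b (L + t0 + 1) (k - L - (t0 + 1))
            rw [show L + t0 + 1 + (k - L - (t0 + 1)) = k from by omega] at h3
            rw [show k + 1 - (L + t0 + 1) = k - L - (t0 + 1) + 1 from by omega, h3]
          have hsum : sumB b L (k - L) - sumB b L (t0 + 1) + b.getD k 0
              = sumB b (L + t0 + 1) (k + 1 - (L + t0 + 1)) := by
            rw [hsplit, ← hlast]; ring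
          simp only [hcf, Bool.false_eq_true, if_false, Prod.mk.injEq]
          refine ⟨hsum, ?_, trivial, ?_⟩
          · rw [hsum]; congr 2; omega
          · have e4 : v = a.getD ((L + t0 + 1) + (k - L - (t0 + 1))) 0 := by
              rw [hv]; congr 1; omega
            rw [e4] at hcf ⊢
            rw [winDict_insert_last _ _ _ hcf]
            congr 1; omega
        · -- B side
          have hget : (lastFold a k).get? v = some ((L + t0 : Nat) : Int) := by
            rw [← hvj0]
            exact lastFold_get?_last a k (L + t0) hj0k (fun t ht1 ht2 hc' => by
              have := hdist t (L + t0) (by omega) (by omega) (by omega) (by omega) hc'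
              omega)
          simp only [pvBstep, PySem.List.pyGetD_natCast, ← hv, hget]
          rw [if_pos (by exact_mod_cast Nat.le_add_right L t0)]
          simp only [Prod.mk.injEq]
          refine ⟨?_, by push_cast; ring, ?_⟩
          · rw [lastFold_succ, hv]
          · rw [show ((k : Int) + 1) = ((k + 1 : Nat) : Int) from by push_cast; ring,
              show ((L + t0 : Nat) : Int) + 1 = ((L + t0 + 1 : Nat) : Int) from by push_cast; ring,
              PySem.List.pyGetD_natCast, PySem.List.pyGetD_natCast, hp,
              PySem.List.getD_map_range (fun j => sumB b 0 j) (m + 1) (k + 1) 0 (by omega),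
              PySem.List.getD_map_range (fun j => sumB b 0 j) (m + 1) (L + t0 + 1) 0 (by omega)]
            congr 1
            have h5 := sumB_add b 0 (L + t0 + 1) (k - (L + t0))
            rw [show L + t0 + 1 + (k - (L + t0)) = k + 1 from by omega] at h5
            rw [h5, show 0 + (L + t0 + 1) = L + t0 + 1 from by omega]
            ring
      · -- a[k] does not occur in the current window
        have hcf : (winDict a L (k - L)).contains v = false := by
          rw [← Bool.not_eq_true, winDict_contains]
          rintro ⟨t, ht, hvt⟩
          exact hocc ⟨L + t, by omega, by omega, hvt⟩
        have hBfin : ((lastFold a k).insert v (k : Int), (L : Int),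
              max ans (PySem.List.pyGetD p ((k : Int) + 1) 0 - p.getD L 0))
            = (lastFold a (k + 1), (L : Int), max ans (sumB b L (k + 1 - L))) := by
          simp only [Prod.mk.injEq]
          refine ⟨by rw [lastFold_succ, hv], trivial, ?_⟩
          rw [show ((k : Int) + 1) = ((k + 1 : Nat) : Int) from by push_cast; ring,
            PySem.List.pyGetD_natCast, hp,
            PySem.List.getD_map_range (fun j => sumB b 0 j) (m + 1) (k + 1) 0 (by omega),
            PySem.List.getD_map_range (fun j => sumB b 0 j) (m + 1) L 0 (by omega)]
          congr 1
          have h5 := sumB_add b 0 L (k + 1 - L)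
          rw [show L + (k + 1 - L) = k + 1 from by omega] at h5
          rw [h5, show 0 + L = L from by omega]
          ring
        refine ⟨L, max ans (sumB b L (k + 1 - L)), by omega, ?_, ?_, ?_⟩
        · intro j1 j2 h1 h2 h3 h4 he
          by_cases e1 : j1 = k <;> by_cases e2 : j2 = k
          · omega
          · exact absurd ⟨j2, h3, by omega, by rw [← he, e1]⟩ hocc
          · exact absurd ⟨j1, h1, by omega, by rw [he, e2]⟩ hocc
          · exact hdist j1 j2 h1 (by omega) h3 (by omega) he
        · simp only [pvAstep, PySem.List.pyGetD_natCast, ← hv, winDict_size]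
          rw [pvAwhile_not_mem _ _ _ _ _ _ _ hcf]
          have hsum : sumB b L (k - L) + b.getD k 0 = sumB b L (k + 1 - L) := by
            have h3 := sumB_succ_right b L (k - L)
            rw [show L + (k - L) = k from by omega] at h3
            rw [show k + 1 - L = k - L + 1 from by omega, h3]
          simp only [hcf, Bool.false_eq_true, if_false, Prod.mk.injEq]
          refine ⟨hsum, by rw [hsum], trivial, ?_⟩
          have e4 : v = a.getD (L + (k - L)) 0 := by rw [hv]; congr 1; omega
          rw [e4] at hcf ⊢
          rw [winDict_insert_last _ _ _ hcf]
          congr 1; omega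
        · rcases hg : (lastFold a k).get? v with _ | x
          · simp only [pvBstep, PySem.List.pyGetD_natCast, ← hv, hg]
            exact hBfin
          · obtain ⟨j, hjk, rfl, hja⟩ := lastFold_mem_val a k v x hg
            have hjL : j < L := by
              by_contra h'
              exact hocc ⟨j, by omega, hjk, hja⟩
            simp only [pvBstep, PySem.List.pyGetD_natCast, ← hv, hg]
            rw [if_neg (show ¬ ((L : Int) ≤ (j : Int)) from by exact_mod_cast (by omega : ¬ (L ≤ j))),
              PySem.List.pyGetD_natCast p L 0]
            exact hBfin

-- ===== VERDICT (by name: the statement is the Claim_ definition above) =====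
theorem returnMaxSum_spec : Claim_equal_returnMaxSum := by
  intro a b n _ _
  unfold Spec_returnMaxSum returnMaxSum returnMaxSum_alt
  rw [PySem.List.pyRange_zero, List.foldl_map, List.foldl_map]
  obtain ⟨L, ans, -, -, hA, hB⟩ :=
    main_inv a b (pvPrefix b n) n.toNat (pvPrefix_eq b n) n.toNat (le_refl _)
  rw [hA, hB]
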